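-- pv_equiv track=rewrite | github.com/davidbstein/textchart | src/textchart/textchart.py | _render_scatter
-- ===== SOURCE A (Python) =====
-- def _render_scatter(counts, glyph_lookup, glyph_thresholds):
--   to_ret = []
--   for row in counts:
--     cur_row = ""
--     for count in row:
--       cur_row += glyph_lookup[sum(count >= threshold for threshold in glyph_thresholds)]
--     to_ret.append(''.join(cur_row))
--   return to_ret
-- ===== SOURCE B (Python) =====
-- def _render_scatter(counts, glyph_lookup, glyph_thresholds):
--     ts = sorted(glyph_thresholds)
--     n = len(ts)
--
--     def glyph_index(count):
--         # bisect_right on the sorted thresholds: number of thresholds <= count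
--         lo, hi = 0, n
--         while lo < hi:
--             mid = (lo + hi) // 2
--             if count < ts[mid]:
--                 hi = mid
--             else:
--                 lo = mid + 1
--         return lo
--
--     return ["".join(glyph_lookup[glyph_index(c)] for c in row) for row in counts]
-- ===== Notes on version B (the rewrite author's own statement) =====
-- stated objective: faster
-- what changed: Sort the thresholds once and find each cell's glyph index by hand-written binary search (bisect_right) instead of summing count>=t over the unsorted threshold list for every cell.
import Mathlib
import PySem

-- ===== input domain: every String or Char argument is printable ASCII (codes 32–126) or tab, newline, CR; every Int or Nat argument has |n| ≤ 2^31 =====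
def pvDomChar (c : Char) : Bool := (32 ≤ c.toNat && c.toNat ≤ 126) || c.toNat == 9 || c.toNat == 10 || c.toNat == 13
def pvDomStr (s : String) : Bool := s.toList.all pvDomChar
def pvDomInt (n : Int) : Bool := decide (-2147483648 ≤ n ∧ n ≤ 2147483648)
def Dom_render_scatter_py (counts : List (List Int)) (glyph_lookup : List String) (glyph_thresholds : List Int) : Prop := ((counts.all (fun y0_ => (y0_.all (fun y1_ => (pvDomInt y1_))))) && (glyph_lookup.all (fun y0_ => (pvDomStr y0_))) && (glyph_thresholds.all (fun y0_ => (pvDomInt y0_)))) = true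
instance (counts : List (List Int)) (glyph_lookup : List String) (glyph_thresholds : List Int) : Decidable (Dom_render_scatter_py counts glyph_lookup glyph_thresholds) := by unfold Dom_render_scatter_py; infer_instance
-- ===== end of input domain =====

-- B sorts the thresholds once and finds each glyph index by binary search (bisect_right)
-- instead of A's per-cell linear sum over the threshold list; return value only, no mutation.

-- ===== PORT A =====
-- sum(count >= threshold for threshold in glyph_thresholds)
def pvASum (c : Int) (ts : List Int) : Int :=
  ts.foldl (fun acc t => acc + (if c ≥ t then 1 else 0)) 0

def render_scatter_py (counts : List (List Int)) (glyph_lookup : List String) (glyph_thresholds : List Int) : List String :=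
  counts.foldl (fun to_ret row =>
    let cur_row := row.foldl (fun cur c =>
      cur ++ PySem.List.pyGetD glyph_lookup (pvASum c glyph_thresholds) "") ""
    to_ret ++ [cur_row]) []

-- ===== PORT B =====
-- hand-written bisect_right loop of Source B (while lo < hi: mid = (lo+hi)//2 …)
def pvBisect (ts : List Int) (c : Int) (lo hi : Nat) : Nat :=
  if h : lo < hi then
    let mid := (lo + hi) / 2
    if c < ts.getD mid 0 then pvBisect ts c lo mid else pvBisect ts c (mid + 1) hi
  else lo
termination_by hi - lo
decreasing_by
  · omega
  · omega

def render_scatter_py_alt (counts : List (List Int)) (glyph_lookup : List String) (glyph_thresholds : List Int) : List String :=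
  let ts := PySem.List.sorted glyph_thresholds (fun x => x) false
  counts.map (fun row =>
    String.join (row.map (fun c =>
      PySem.List.pyGetD glyph_lookup ((pvBisect ts c 0 ts.length : Nat) : Int) "")))

-- ===== PRECONDITION & SPEC =====
-- Pre_ excludes exactly the inputs where A raises IndexError: some cell's glyph index
-- (the number of thresholds ≤ that cell's count) is not below len(glyph_lookup).
def Pre_render_scatter_py (counts : List (List Int)) (glyph_lookup : List String) (glyph_thresholds : List Int) : Prop :=
  ∀ row ∈ counts, ∀ c ∈ row, glyph_thresholds.countP (fun t => decide (t ≤ c)) < glyph_lookup.length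
instance (counts : List (List Int)) (glyph_lookup : List String) (glyph_thresholds : List Int) : Decidable (Pre_render_scatter_py counts glyph_lookup glyph_thresholds) := by unfold Pre_render_scatter_py; infer_instance

def pvWitness_render_scatter_py : List (List Int) × List String × List Int :=
  ([[0, 5], [-3, 2]], ["-", "+", "#"], [1, 4])

def Spec_render_scatter_py (counts : List (List Int)) (glyph_lookup : List String) (glyph_thresholds : List Int) (out : List String) : Prop := out = render_scatter_py_alt counts glyph_lookup glyph_thresholds
instance (counts : List (List Int)) (glyph_lookup : List String) (glyph_thresholds : List Int) (out : List String) : Decidable (Spec_render_scatter_py counts glyph_lookup glyph_thresholds out) := by unfold Spec_render_scatter_py; infer_instance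

-- ===== CLAIM (what is proved, stated in full; the proofs are below) =====
def Claim_equal_render_scatter_py : Prop := ∀ (counts : List (List Int)) (glyph_lookup : List String) (glyph_thresholds : List Int), Dom_render_scatter_py counts glyph_lookup glyph_thresholds → Pre_render_scatter_py counts glyph_lookup glyph_thresholds → Spec_render_scatter_py counts glyph_lookup glyph_thresholds (render_scatter_py counts glyph_lookup glyph_thresholds)

-- ===== LEMMAS AND PROOFS =====

-- A's per-cell sum counts the thresholds ≤ c.
theorem pvASum_eq_countP (c : Int) (ts : List Int) :
    pvASum c ts = (ts.countP (fun t => decide (t ≤ c)) : Int) := by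
  unfold pvASum
  suffices h : ∀ (acc : Int), ts.foldl (fun acc t => acc + (if c ≥ t then 1 else 0)) acc
      = acc + (ts.countP (fun t => decide (t ≤ c)) : Int) by
    simpa using h 0
  induction ts with
  | nil => intro acc; simp
  | cons t ts ih =>
    intro acc
    simp only [List.foldl_cons, List.countP_cons, ih]
    by_cases h : t ≤ c
    · simp [h, ge_iff_le]; ring
    · simp [h, ge_iff_le]

-- If the first r entries are ≤ c and the rest are > c, the count of entries ≤ c is r.
theorem countP_eq_of_split (ts : List Int) (c : Int) (r : Nat) (hr : r ≤ ts.length)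
    (h1 : ∀ i, i < r → ts.getD i 0 ≤ c)
    (h2 : ∀ i, r ≤ i → i < ts.length → c < ts.getD i 0) :
    ts.countP (fun t => decide (t ≤ c)) = r := by
  have hsplit : ts = ts.take r ++ ts.drop r := (List.take_append_drop r ts).symm
  rw [hsplit, List.countP_append]
  have htake : (ts.take r).countP (fun t => decide (t ≤ c)) = (ts.take r).length := by
    apply List.countP_eq_length.mpr
    intro a ha
    obtain ⟨i, hi, hget⟩ := List.mem_iff_getElem.mp ha
    have hilen : i < ts.length := by simp at hi; omega
    have hir : i < r := by simp at hi; omega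
    have : ts[i] = a := by rw [← hget]; simp [List.getElem_take]
    have := h1 i hir
    simp [List.getD_eq_getElem?_getD, List.getElem?_eq_getElem hilen] at this
    simp [← ‹ts[i] = a›]
    omega
  have hdrop : (ts.drop r).countP (fun t => decide (t ≤ c)) = 0 := by
    apply List.countP_eq_zero.mpr
    intro a ha
    obtain ⟨i, hi, hget⟩ := List.mem_iff_getElem.mp ha
    have hilen : r + i < ts.length := by simp at hi; omega
    have : ts[r + i] = a := by rw [← hget]; simp [List.getElem_drop]
    have h2' := h2 (r + i) (by omega) hilen
    simp [List.getD_eq_getElem?_getD, List.getElem?_eq_getElem hilen] at h2'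
    simp [← ‹ts[r+i] = a›]
    omega
  rw [htake, hdrop]
  simp [min_eq_left hr]

-- The binary search returns the split point of a sorted list.
theorem pvBisect_eq_countP (ts : List Int) (c : Int)
    (hs : ts.Pairwise (· ≤ ·)) :
    ∀ lo hi, lo ≤ hi → hi ≤ ts.length →
    (∀ i, i < lo → ts.getD i 0 ≤ c) →
    (∀ i, hi ≤ i → i < ts.length → c < ts.getD i 0) →
    pvBisect ts c lo hi = ts.countP (fun t => decide (t ≤ c)) := by
  intro lo hi
  induction hn : hi - lo using Nat.strong_induction_on generalizing lo hi with
  | _ n ih =>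
    intro hle hhi hlo hup
    rw [pvBisect]
    split
    · next h =>
      show (if c < ts.getD ((lo + hi) / 2) 0 then pvBisect ts c lo ((lo + hi) / 2)
            else pvBisect ts c ((lo + hi) / 2 + 1) hi) = _
      have hmid : (lo + hi) / 2 < hi := by omega
      have hmidlo : lo ≤ (lo + hi) / 2 := by omega
      have hmidlen : (lo + hi) / 2 < ts.length := lt_of_lt_of_le hmid hhi
      have hrel : ∀ i j, i ≤ j → j < ts.length → ts.getD i 0 ≤ ts.getD j 0 := by
        intro i j hij hj
        rcases Nat.lt_or_ge i j with hlt | hge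
        · have := (List.pairwise_iff_getElem.mp hs) i j (lt_trans hlt hj) hj hlt
          simpa [List.getD_eq_getElem?_getD, List.getElem?_eq_getElem (lt_trans hlt hj),
            List.getElem?_eq_getElem hj] using this
        · have : i = j := by omega
          simp [this]
      split
      · next hc =>
        exact ih ((lo + hi) / 2 - lo) (by omega) lo ((lo + hi) / 2) rfl hmidlo
          (le_of_lt hmidlen) hlo
          (fun i hi' hilen => lt_of_lt_of_le hc (hrel _ _ hi' hilen))
      · next hc =>
        have hc' : ts.getD ((lo + hi) / 2) 0 ≤ c := le_of_not_gt hc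
        exact ih (hi - ((lo + hi) / 2 + 1)) (by omega) ((lo + hi) / 2 + 1) hi rfl (by omega)
          hhi
          (fun i hi' => le_trans (hrel i ((lo + hi) / 2) (by omega) hmidlen) hc')
          hup
    · next h =>
      have hlohi : lo = hi := by omega
      exact (countP_eq_of_split ts c lo (hlohi ▸ hhi)
        (fun i hi' => hlo i hi')
        (fun i hi' hilen => hup i (hlohi ▸ hi') hilen)).symm

-- Both per-cell glyphs agree (no range assumption needed for the ports themselves).
theorem pvCell_eq (glyph_lookup : List String) (glyph_thresholds : List Int) (c : Int) :
    PySem.List.pyGetD glyph_lookup (pvASum c glyph_thresholds) ""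
      = PySem.List.pyGetD glyph_lookup
          ((pvBisect (PySem.List.sorted glyph_thresholds (fun x => x) false) c 0
            (PySem.List.sorted glyph_thresholds (fun x => x) false).length : Nat) : Int) "" := by
  set ts := PySem.List.sorted glyph_thresholds (fun x => x) false with hts
  have hperm : ts.Perm glyph_thresholds := PySem.List.sorted_perm ..
  have hs : ts.Pairwise (· ≤ ·) := by
    have := PySem.List.sorted_pairwise glyph_thresholds (fun x => x)
    simpa using this
  have hb : pvBisect ts c 0 ts.length = ts.countP (fun t => decide (t ≤ c)) :=
    pvBisect_eq_countP ts c hs 0 ts.length (Nat.zero_le _) le_rfl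
      (fun i hi => absurd hi (Nat.not_lt_zero i)) (fun i hi hilen => absurd hilen (by omega))
  rw [pvASum_eq_countP, hb, hperm.countP_eq]

-- A's string accumulation equals join-of-map.
theorem pvJoinAux (l : List String) : ∀ t : String, l.foldl (· ++ ·) t = t ++ String.join l := by
  induction l with
  | nil => intro t; simp [String.join]
  | cons a l ih =>
    intro t
    have h1 : String.join (a :: l) = a ++ String.join l := by
      simp only [String.join, List.foldl_cons]; rw [ih]; simp
      rfl
    rw [List.foldl_cons, ih, h1, String.append_assoc]

theorem pvRow_eq (g : Int → String) (row : List Int) :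
    row.foldl (fun cur c => cur ++ g c) "" = String.join (row.map g) := by
  rw [← List.foldl_map, pvJoinAux]
  simp

-- A's outer foldl equals map.
theorem pvOuter_eq (f : List Int → String) (counts : List (List Int)) :
    counts.foldl (fun to_ret row => to_ret ++ [f row]) [] = counts.map f := by
  suffices h : ∀ (acc : List String),
      counts.foldl (fun to_ret row => to_ret ++ [f row]) acc = acc ++ counts.map f by
    simpa using h []
  induction counts with
  | nil => intro acc; simp
  | cons r rs ih => intro acc; simp [ih]

-- ===== VERDICT (by name: the statement is the Claim_ definition above) =====
theorem render_scatter_py_spec : Claim_equal_render_scatter_py := by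
  intro counts glyph_lookup glyph_thresholds _ _
  unfold Spec_render_scatter_py render_scatter_py render_scatter_py_alt
  rw [pvOuter_eq]
  apply List.map_congr_left
  intro row _
  rw [pvRow_eq]
  congr 1
  apply List.map_congr_left
  intro c _
  exact pvCell_eq glyph_lookup glyph_thresholds c
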